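-- pv_equiv track=rewrite | github.com/PillowGit/aoc | src/2025/7.py | sln2
-- ===== SOURCE A (Python) =====
-- def sln2(input):
--   g = input
--   g.append(['.'] * len(g[0]))
--   lasers = [0] * len(g[0])
--   lasers[g[0].index('S')] = 1
--   depth = 1
--   while depth < len(g):
--     new_lasers = [0] * len(g[depth])
--     for l in range(len(g[depth])):
--       if lasers[l] > 0:
--         if g[depth][l] == '^':
--           lft, rgt = l - 1, l + 1
--           if lft in range(len(g[depth])):
--             new_lasers[lft] += lasers[l]
--           if rgt in range(len(g[depth])):
--             new_lasers[rgt] += lasers[l]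
--         else:
--           new_lasers[l] += lasers[l]
--     lasers = new_lasers
--     depth += 1
--   return sum(lasers)
-- ===== SOURCE B (Python) =====
-- # Backward DP (count paths from each cell to the bottom) instead of forward laser propagation.
-- # Like A, mutates `input` by appending a row of '.'; equivalence claimed for the return value.
-- def sln2(input):
--   g = input
--   g.append(['.'] * len(g[0]))
--   s = g[0].index('S')
--   w = len(g[0])
--   cur = [1] * w
--   for depth in range(len(g) - 1, 0, -1):
--     row = g[depth]
--     cur = [(cur[c - 1] if c > 0 else 0) + (cur[c + 1] if c + 1 < w else 0)
--            if row[c] == '^' else cur[c]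
--            for c in range(w)]
--   return cur[s]
-- ===== Notes on version B (the rewrite author's own statement) =====
-- stated objective: alternative
-- what changed: Replaces A's forward propagation of a laser-count vector (scatter with in-place += updates row by row downward) by a backward dynamic program that computes, bottom row upward, the number of endpoints reachable from each cell, and reads off the entry at the start column.
import Mathlib
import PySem

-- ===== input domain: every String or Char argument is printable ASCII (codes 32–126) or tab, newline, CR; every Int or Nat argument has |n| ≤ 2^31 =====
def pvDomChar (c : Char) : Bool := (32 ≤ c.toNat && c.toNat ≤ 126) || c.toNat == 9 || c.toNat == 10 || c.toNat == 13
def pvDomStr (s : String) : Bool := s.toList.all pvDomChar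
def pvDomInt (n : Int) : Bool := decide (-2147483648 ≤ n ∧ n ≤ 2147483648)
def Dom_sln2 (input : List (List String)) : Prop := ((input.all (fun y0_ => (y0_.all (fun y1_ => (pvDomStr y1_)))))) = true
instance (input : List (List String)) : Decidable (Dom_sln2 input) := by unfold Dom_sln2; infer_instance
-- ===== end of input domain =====

-- B replaces A's forward scatter of a laser-count vector by a backward DP counting
-- endpoints reachable from each cell; return values agree (both mutate the Python
-- argument identically by appending a row of '.'; equivalence is about the return value).

-- ===== PORT A =====
-- one row of A's while loop: builds new_lasers by the inner for-loop with += updates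
def sln2Step (row : List String) (lasers : List Int) : List Int :=
  (PySem.List.pyRange 0 (row.length : Int) 1).foldl (fun new l =>
    if PySem.List.pyGetD lasers l 0 > 0 then
      if PySem.List.pyGetD row l "" = "^" then
        let lft := l - 1
        let rgt := l + 1
        let new :=
          if 0 ≤ lft ∧ lft < (row.length : Int) then
            PySem.List.pySetD new lft (PySem.List.pyGetD new lft 0 + PySem.List.pyGetD lasers l 0)
          else new
        if 0 ≤ rgt ∧ rgt < (row.length : Int) then
          PySem.List.pySetD new rgt (PySem.List.pyGetD new rgt 0 + PySem.List.pyGetD lasers l 0)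
        else new
      else
        PySem.List.pySetD new l (PySem.List.pyGetD new l 0 + PySem.List.pyGetD lasers l 0)
    else new) (List.replicate row.length (0 : Int))

def sln2 (input : List (List String)) : Int :=
  let g := input ++ [List.replicate (input.headD []).length "."]
  let lasers0 := PySem.List.pySetD (List.replicate (g.headD []).length (0 : Int))
      (((PySem.List.index? (g.headD []) "S").getD 0 : Nat) : Int) 1
  let lasers := (PySem.List.pyRange 1 (g.length : Int) 1).foldl
      (fun lasers depth => sln2Step (PySem.List.pyGetD g depth []) lasers) lasers0
  lasers.sum

-- ===== PORT B =====
-- one row of B's backward DP: the list comprehension over range(w)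
def sln2AltStep (w : Nat) (row : List String) (cur : List Int) : List Int :=
  (List.range w).map (fun (c : Nat) =>
    if PySem.List.pyGetD row (c : Int) "" = "^" then
      (if 0 < c then PySem.List.pyGetD cur ((c : Int) - 1) 0 else 0) +
      (if c + 1 < w then PySem.List.pyGetD cur ((c : Int) + 1) 0 else 0)
    else PySem.List.pyGetD cur (c : Int) 0)

def sln2_alt (input : List (List String)) : Int :=
  let g := input ++ [List.replicate (input.headD []).length "."]
  let s := ((PySem.List.index? (g.headD []) "S").getD 0 : Nat)
  let w := (g.headD []).length
  let cur := (PySem.List.pyRange ((g.length : Int) - 1) 0 (-1)).foldl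
      (fun cur depth => sln2AltStep w (PySem.List.pyGetD g depth []) cur)
      (List.replicate w (1 : Int))
  PySem.List.pyGetD cur (s : Int) 0

-- ===== PRECONDITION & SPEC =====
-- Exactly the inputs on which the Python A returns: a nonempty grid whose first row
-- contains 'S' (else ValueError/IndexError) and whose rows all have the first row's
-- length (on any ragged grid A's lasers[l] read raises IndexError before returning).
def Pre_sln2 (input : List (List String)) : Prop :=
  input ≠ [] ∧ "S" ∈ input.headD [] ∧ ∀ row ∈ input, row.length = (input.headD []).length
instance (input : List (List String)) : Decidable (Pre_sln2 input) := by unfold Pre_sln2; infer_instance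

def pvWitness_sln2 : List (List String) := [["S", "."], ["^", "."]]

def Spec_sln2 (input : List (List String)) (out : Int) : Prop := out = sln2_alt input
instance (input : List (List String)) (out : Int) : Decidable (Spec_sln2 input out) := by unfold Spec_sln2; infer_instance

-- ===== CLAIM (what is proved, stated in full; the proofs are below) =====
def Claim_equal_sln2 : Prop := ∀ (input : List (List String)), Dom_sln2 input → Pre_sln2 input → Spec_sln2 input (sln2 input)

-- ===== LEMMAS AND PROOFS =====

-- dot product of two Int lists
def pvDot (x u : List Int) : Int := (List.zipWith (· * ·) x u).sum

theorem pvDot_replicate_one (v : List Int) : pvDot v (List.replicate v.length 1) = v.sum := by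
  induction v with
  | nil => rfl
  | cons a v ih => simp [pvDot, List.replicate_succ] at ih ⊢; omega

theorem pvDot_replicate_zero (n : Nat) (u : List Int) : pvDot (List.replicate n 0) u = 0 := by
  induction n generalizing u with
  | zero => rfl
  | succ n ih =>
    cases u with
    | nil => simp [pvDot]
    | cons b u => simp [pvDot, List.replicate_succ] at ih ⊢; exact ih u

theorem pvDot_set_add (x : List Int) (u : List Int) (n : Nat) (a : Int)
    (hn : n < x.length) (hlen : x.length = u.length) :
    pvDot (x.set n (x.getD n 0 + a)) u = pvDot x u + a * u.getD n 0 := by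
  induction x generalizing u n with
  | nil => simp at hn
  | cons b x ih =>
    cases u with
    | nil => simp at hlen
    | cons c u =>
      cases n with
      | zero => simp [pvDot]; ring
      | succ n =>
        have := ih u n (by simpa using hn) (by simpa using hlen)
        simp only [pvDot, List.set_cons_succ, List.getD_cons_succ, List.zipWith_cons_cons,
          List.sum_cons] at this ⊢
        omega

theorem pvDot_eq_sum_range (x u : List Int) (hlen : x.length = u.length) :
    pvDot x u = ∑ l ∈ Finset.range x.length, x.getD l 0 * u.getD l 0 := by
  induction x generalizing u with
  | nil => simp [pvDot]
  | cons a x ih =>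
    cases u with
    | nil => simp at hlen
    | cons b u =>
      rw [List.length_cons, Finset.sum_range_succ']
      simp only [List.getD_cons_succ, List.getD_cons_zero]
      have := ih u (by simpa using hlen)
      simp [pvDot] at this ⊢
      omega

-- value of B's row map at index c
def pvAltVal (w : Nat) (row : List String) (u : List Int) (c : Nat) : Int :=
  if PySem.List.pyGetD row (c : Int) "" = "^" then
    (if 0 < c then PySem.List.pyGetD u ((c : Int) - 1) 0 else 0) +
    (if c + 1 < w then PySem.List.pyGetD u ((c : Int) + 1) 0 else 0)
  else PySem.List.pyGetD u (c : Int) 0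

theorem sln2AltStep_length (w : Nat) (row : List String) (cur : List Int) :
    (sln2AltStep w row cur).length = w := by simp [sln2AltStep]

theorem sln2AltStep_getD (w : Nat) (row : List String) (cur : List Int) (c : Nat) (hc : c < w) :
    (sln2AltStep w row cur).getD c 0 = pvAltVal w row cur c := by
  have hl : c < (sln2AltStep w row cur).length := by rw [sln2AltStep_length]; exact hc
  rw [List.getD_eq_getElem _ _ hl]
  simp only [sln2AltStep, List.getElem_map, List.getElem_range]
  rfl

-- the body of A's inner for-loop, named for the proofs
def pvBodyA (row : List String) (lasers : List Int) (new : List Int) (l : Int) : List Int :=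
  if PySem.List.pyGetD lasers l 0 > 0 then
    if PySem.List.pyGetD row l "" = "^" then
      let lft := l - 1
      let rgt := l + 1
      let new :=
        if 0 ≤ lft ∧ lft < (row.length : Int) then
          PySem.List.pySetD new lft (PySem.List.pyGetD new lft 0 + PySem.List.pyGetD lasers l 0)
        else new
      if 0 ≤ rgt ∧ rgt < (row.length : Int) then
        PySem.List.pySetD new rgt (PySem.List.pyGetD new rgt 0 + PySem.List.pyGetD lasers l 0)
      else new
    else
      PySem.List.pySetD new l (PySem.List.pyGetD new l 0 + PySem.List.pyGetD lasers l 0)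
  else new

theorem sln2Step_eq (row : List String) (lasers : List Int) :
    sln2Step row lasers =
      (PySem.List.pyRange 0 (row.length : Int) 1).foldl (pvBodyA row lasers)
        (List.replicate row.length (0 : Int)) := rfl

theorem pvGetD_nonneg (xs : List Int) (k : Nat) (h : ∀ x ∈ xs, 0 ≤ x) : 0 ≤ xs.getD k 0 := by
  induction xs generalizing k with
  | nil => simp
  | cons a xs ih =>
    cases k with
    | zero => exact h a (by simp)
    | succ k => simpa using ih k (fun x hx => h x (by simp [hx]))

theorem pvPyGetD_nonneg (xs : List Int) (i : Int) (h : ∀ x ∈ xs, 0 ≤ x) :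
    0 ≤ PySem.List.pyGetD xs i 0 := by
  by_cases hr : PySem.Raise.InRange xs.length i
  · exact h _ (PySem.List.pyGetD_mem xs 0 hr)
  · rw [PySem.List.pyGetD_of_none xs i 0 ((PySem.List.pyGet?_eq_none_iff xs i).mpr hr)]

theorem pvBodyA_length (row : List String) (lasers new : List Int) (l : Int) :
    (pvBodyA row lasers new l).length = new.length := by
  unfold pvBodyA
  dsimp only
  split_ifs <;> simp [PySem.List.length_pySetD]

theorem pvFoldA_length (row : List String) (lasers : List Int) (idx : List Int)
    (new : List Int) : (idx.foldl (pvBodyA row lasers) new).length = new.length := by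
  induction idx generalizing new with
  | nil => rfl
  | cons i idx ih => rw [List.foldl_cons, ih, pvBodyA_length]

theorem pvSet_nonneg (m : List Int) (i : Int) (a : Int) (hi : 0 ≤ i)
    (hm : ∀ x ∈ m, 0 ≤ x) (ha : 0 ≤ a) :
    ∀ x ∈ PySem.List.pySetD m i (PySem.List.pyGetD m i 0 + a), 0 ≤ x := by
  intro x hx
  rw [PySem.List.pySetD_of_nonneg m _ hi] at hx
  rcases List.mem_or_eq_of_mem_set hx with h | h
  · exact hm x h
  · have := pvPyGetD_nonneg m i hm; omega

theorem pvBodyA_nonneg (row : List String) (lasers new : List Int) (l : Int) (hl0 : 0 ≤ l)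
    (hnew : ∀ x ∈ new, 0 ≤ x) : ∀ x ∈ pvBodyA row lasers new l, 0 ≤ x := by
  unfold pvBodyA
  by_cases h1 : PySem.List.pyGetD lasers l 0 > 0
  · rw [if_pos h1]
    have hL : 0 ≤ PySem.List.pyGetD lasers l 0 := le_of_lt h1
    by_cases h2 : PySem.List.pyGetD row l "" = "^"
    · rw [if_pos h2]
      dsimp only
      by_cases h3 : 0 ≤ l - 1 ∧ l - 1 < (row.length : Int)
      · rw [if_pos h3]
        by_cases h4 : 0 ≤ l + 1 ∧ l + 1 < (row.length : Int)
        · rw [if_pos h4]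
          exact pvSet_nonneg _ (l + 1) _ h4.1 (pvSet_nonneg new (l - 1) _ h3.1 hnew hL) hL
        · rw [if_neg h4]
          exact pvSet_nonneg new (l - 1) _ h3.1 hnew hL
      · rw [if_neg h3]
        by_cases h4 : 0 ≤ l + 1 ∧ l + 1 < (row.length : Int)
        · rw [if_pos h4]
          exact pvSet_nonneg new (l + 1) _ h4.1 hnew hL
        · rw [if_neg h4]
          exact hnew
    · rw [if_neg h2]
      exact pvSet_nonneg new l _ hl0 hnew hL
  · rw [if_neg h1]; exact hnew

theorem pvBodyA_dot (w : Nat) (row : List String) (lasers u new : List Int) (c : Nat)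
    (hrow : row.length = w) (hlas : lasers.length = w) (hu : u.length = w)
    (hnew : new.length = w) (hc : c < w) (hnn : 0 ≤ lasers.getD c 0) :
    pvDot (pvBodyA row lasers new (c : Int)) u
      = pvDot new u + lasers.getD c 0 * pvAltVal w row u c := by
  have hgl : PySem.List.pyGetD lasers ((c : Nat) : Int) 0 = lasers.getD c 0 :=
    PySem.List.pyGetD_natCast lasers c 0
  unfold pvBodyA pvAltVal
  rw [hgl]
  by_cases hpos : lasers.getD c 0 > 0
  · rw [if_pos hpos]
    by_cases hcar : PySem.List.pyGetD row (c : Int) "" = "^"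
    · rw [if_pos hcar, if_pos hcar]
      dsimp only
      by_cases h0 : 0 < c
      · have e1 : ((c : Int) - 1) = ((c - 1 : Nat) : Int) := by omega
        have cond1 : (0 ≤ (c : Int) - 1 ∧ (c : Int) - 1 < (row.length : Int)) := by omega
        rw [if_pos cond1, if_pos h0, e1]
        simp only [PySem.List.pySetD_natCast, PySem.List.pyGetD_natCast]
        by_cases h2 : c + 1 < w
        · have e2 : ((c : Int) + 1) = ((c + 1 : Nat) : Int) := by push_cast; ring
          have cond2 : (0 ≤ (c : Int) + 1 ∧ (c : Int) + 1 < (row.length : Int)) := by omega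
          rw [if_pos cond2, if_pos h2, e2]
          simp only [PySem.List.pySetD_natCast, PySem.List.pyGetD_natCast]
          rw [pvDot_set_add _ u _ _ (by simp [hnew]; omega) (by simp [hnew, hu])]
          rw [pvDot_set_add _ u _ _ (by simp [hnew]; omega) (by simp [hnew, hu])]
          ring
        · have cond2 : ¬ (0 ≤ (c : Int) + 1 ∧ (c : Int) + 1 < (row.length : Int)) := by omega
          rw [if_neg cond2, if_neg h2]
          rw [pvDot_set_add _ u _ _ (by simp [hnew]; omega) (by simp [hnew, hu])]
          ring
      · have cond1 : ¬ (0 ≤ (c : Int) - 1 ∧ (c : Int) - 1 < (row.length : Int)) := by omega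
        rw [if_neg cond1, if_neg h0]
        by_cases h2 : c + 1 < w
        · have e2 : ((c : Int) + 1) = ((c + 1 : Nat) : Int) := by push_cast; ring
          have cond2 : (0 ≤ (c : Int) + 1 ∧ (c : Int) + 1 < (row.length : Int)) := by omega
          rw [if_pos cond2, if_pos h2, e2]
          simp only [PySem.List.pySetD_natCast, PySem.List.pyGetD_natCast]
          rw [pvDot_set_add _ u _ _ (by simp [hnew]; omega) (by simp [hnew, hu])]
          ring
        · have cond2 : ¬ (0 ≤ (c : Int) + 1 ∧ (c : Int) + 1 < (row.length : Int)) := by omega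
          rw [if_neg cond2, if_neg h2]
          ring_nf
    · rw [if_neg hcar, if_neg hcar]
      simp only [PySem.List.pySetD_natCast, PySem.List.pyGetD_natCast]
      rw [pvDot_set_add _ u _ _ (by omega) (by omega)]
  · rw [if_neg hpos]
    have h0 : lasers.getD c 0 = 0 := by omega
    rw [h0]
    ring

theorem pvFoldA_dot (w : Nat) (row : List String) (lasers u : List Int)
    (hrow : row.length = w) (hlas : lasers.length = w) (hu : u.length = w)
    (hnn : ∀ x ∈ lasers, 0 ≤ x) :
    ∀ (k : Nat), k ≤ w → ∀ (new : List Int), new.length = w →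
      pvDot ((PySem.List.pyRange 0 (k : Int) 1).foldl (pvBodyA row lasers) new) u
        = pvDot new u + ∑ l ∈ Finset.range k, lasers.getD l 0 * pvAltVal w row u l := by
  intro k
  induction k with
  | zero =>
    intro _ new _
    rw [show ((0 : Nat) : Int) = 0 by simp, PySem.List.pyRange_one_eq_nil (le_refl 0)]
    simp
  | succ k ih =>
    intro hk new hnew
    have hsplit : PySem.List.pyRange 0 ((k + 1 : Nat) : Int) 1
        = PySem.List.pyRange 0 (k : Int) 1 ++ [(k : Int)] := by
      have : ((k + 1 : Nat) : Int) = (k : Int) + 1 := by push_cast; ring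
      rw [this, PySem.List.pyRange_one_succ_right (by omega)]
    rw [hsplit, List.foldl_append, List.foldl_cons, List.foldl_nil]
    rw [pvBodyA_dot w row lasers u _ k hrow hlas hu
      (by rw [pvFoldA_length]; exact hnew) (by omega) (pvGetD_nonneg lasers k hnn)]
    rw [ih (by omega) new hnew, Finset.sum_range_succ]
    ring

theorem sln2Step_length (row : List String) (lasers : List Int) :
    (sln2Step row lasers).length = row.length := by
  rw [sln2Step_eq, pvFoldA_length, List.length_replicate]

theorem sln2Step_nonneg (row : List String) (lasers : List Int) :
    ∀ x ∈ sln2Step row lasers, 0 ≤ x := by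
  rw [sln2Step_eq]
  have h : ∀ (idx : List Int), (∀ i ∈ idx, 0 ≤ i) → ∀ (new : List Int), (∀ x ∈ new, 0 ≤ x) →
      ∀ x ∈ idx.foldl (pvBodyA row lasers) new, 0 ≤ x := by
    intro idx
    induction idx with
    | nil => intro _ new h; simpa using h
    | cons i idx ih =>
      intro hidx new hn
      rw [List.foldl_cons]
      exact ih (fun j hj => hidx j (by simp [hj])) _
        (pvBodyA_nonneg row lasers new i (hidx i (by simp)) hn)
  refine h _ (fun i hi => ?_) _ (by simp)
  have := PySem.List.mem_pyRange_one.mp hi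
  omega

theorem sln2Step_dot (w : Nat) (row : List String) (lasers u : List Int)
    (hrow : row.length = w) (hlas : lasers.length = w) (hu : u.length = w)
    (hnn : ∀ x ∈ lasers, 0 ≤ x) :
    pvDot (sln2Step row lasers) u = pvDot lasers (sln2AltStep w row u) := by
  rw [sln2Step_eq, hrow]
  rw [pvFoldA_dot w row lasers u hrow hlas hu hnn w (le_refl w) _ (by simp)]
  rw [pvDot_replicate_zero]
  rw [pvDot_eq_sum_range lasers _ (by rw [hlas, sln2AltStep_length])]
  rw [hlas]
  rw [zero_add]
  exact Finset.sum_congr rfl (fun l hl => by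
    rw [sln2AltStep_getD w row u l (Finset.mem_range.mp hl)])

theorem pvG_length (w : Nat) (rows : List (List String)) :
    (rows.foldr (fun row u => sln2AltStep w row u) (List.replicate w (1 : Int))).length = w := by
  cases rows with
  | nil => simp
  | cons r rows => simp [sln2AltStep_length]

theorem pvMain (w : Nat) (rows : List (List String)) (hrows : ∀ r ∈ rows, r.length = w) :
    ∀ (v : List Int), v.length = w → (∀ x ∈ v, 0 ≤ x) →
      (rows.foldl (fun acc row => sln2Step row acc) v).sum
        = pvDot v (rows.foldr (fun row u => sln2AltStep w row u) (List.replicate w (1 : Int))) := by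
  induction rows with
  | nil => intro v hv _; simp only [List.foldl_nil, List.foldr_nil]; rw [← hv, pvDot_replicate_one]
  | cons r rows ih =>
    intro v hv hnn
    rw [List.foldl_cons, List.foldr_cons]
    rw [ih (fun x hx => hrows x (by simp [hx])) (sln2Step r v)
      (by rw [sln2Step_length]; exact hrows r (by simp)) (sln2Step_nonneg r v)]
    exact sln2Step_dot w r v _ (hrows r (by simp)) hv (pvG_length w rows) hnn

theorem pvA_outer (g : List (List String)) (init : List Int) :
    (PySem.List.pyRange 1 (g.length : Int) 1).foldl
        (fun lasers depth => sln2Step (PySem.List.pyGetD g depth []) lasers) init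
      = (g.drop 1).foldl (fun acc row => sln2Step row acc) init :=
  PySem.List.foldl_pyRange_pyGetD' g [] (fun acc row => sln2Step row acc) init (by omega)

theorem pvB_outer (g : List (List String)) (w : Nat) (init : List Int) :
    (PySem.List.pyRange ((g.length : Int) - 1) 0 (-1)).foldl
        (fun cur depth => sln2AltStep w (PySem.List.pyGetD g depth []) cur) init
      = (g.drop 1).foldr (fun row u => sln2AltStep w row u) init := by
  rw [PySem.List.pyRange_neg_one_eq_reverse, List.foldl_reverse]
  rw [show (0 : Int) + 1 = 1 by ring, show (g.length : Int) - 1 + 1 = (g.length : Int) by ring]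
  have hmap := PySem.List.map_pyGetD_pyRange' g [] (a := 1) (by omega)
  rw [show ((1 : Int).toNat) = 1 from rfl] at hmap
  conv_rhs => rw [← hmap]
  rw [List.foldr_map]

-- ===== VERDICT (by name: the statement is the Claim_ definition above) =====
theorem sln2_spec : Claim_equal_sln2 := by
  unfold Claim_equal_sln2
  intro input _ hpre
  unfold Spec_sln2
  obtain ⟨hne, hS, hrect⟩ := hpre
  cases input with
  | nil => exact absurd rfl hne
  | cons r0 rest =>
  simp only [List.headD_cons] at hS hrect
  obtain ⟨k, hk⟩ := Option.isSome_iff_exists.mp ((PySem.List.index?_isSome_iff r0 "S").mpr hS)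
  obtain ⟨hklt, -⟩ := PySem.List.getElem_of_index?_eq_some hk
  have hrowsw : ∀ r ∈ rest ++ [List.replicate r0.length ("." : String)], r.length = r0.length := by
    intro r hr
    rcases List.mem_append.mp hr with h | h
    · exact hrect r (by simp [h])
    · simp only [List.mem_singleton] at h
      simp [h]
  have hes : (List.replicate r0.length (0 : Int)).set k 1
      = (List.replicate r0.length (0 : Int)).set k
          ((List.replicate r0.length (0 : Int)).getD k 0 + 1) := by
    rw [List.getD_eq_getElem _ _ (by simpa using hklt)]
    simp
  have hesnn : ∀ x ∈ (List.replicate r0.length (0 : Int)).set k 1, 0 ≤ x := by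
    intro x hx
    rcases List.mem_or_eq_of_mem_set hx with h | h
    · have := List.eq_of_mem_replicate h; omega
    · omega
  simp only [sln2, sln2_alt, List.cons_append, List.headD_cons, hk, Option.getD_some,
    PySem.List.pySetD_natCast, PySem.List.pyGetD_natCast]
  rw [pvA_outer, pvB_outer, List.drop_one, List.tail_cons]
  rw [pvMain r0.length _ hrowsw _ (by simp) hesnn]
  rw [hes, pvDot_set_add _ _ k _ (by simpa using hklt)
    (by rw [List.length_replicate, pvG_length])]
  rw [pvDot_replicate_zero]
  ring
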